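/- GENERATED by mk_final_copies.py from the proof of the farm's unit `start_decoder.C4b` (farm:start_decoder.C4b.1: Proof.lean) as the
   re-elaboration sweep compiled it — do not edit. -/
import Asan.CheckWalk
import Vorbis.Spec.Reader
import Vorbis.Spec.Units.start_decoder_C4b

open X86 X86.User Asan Vorbis Vorbis.Spec Vorbis.Spec.StartDecoder

set_option maxRecDepth 4000
set_option maxHeartbeats 4000000

namespace Vorbis.Spec.start_decoder_C4b

/-- **Segment C4b of `start_decoder`** (`cut123` 0x1147f5, the return of `get_bits(f, 1)`): `present ≠ 0`: the call of
`get_bits(f, 5)` and `InC4Mid` at its return `cut121` (`C4.mid_of_call`); `present = 0`: the checked store `lengths[j] = NO_CODE`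
(`C4.lengths_site`), `++j`, and `InC4Next` at the head (`C4.next_of_store`). One walk; the memory changes are stated ONCE per exit as
a `C4.Agree`. -/
theorem segC4b_walk {Lay : Layout} (hLay : Lay.hi = 0x1000000) {μ : Microarch} (hμ : UserX.MicroOK μ) {u₀ : State}
    (hcode : HasCodeNat Lay u₀ Vorbis.L.start_decoder.entry Vorbis.Code.code_start_decoder.nat Vorbis.L.start_decoder.size)
    (hgb : ∀ (others : List Obj) (frames : List (Nat × FrameLayout)) (Blk : Block → Prop) (len : Nat), Calls Lay μ Vorbis.WayInv (Vorbis.conv u₀) Vorbis.L.get_bits.entry (Vorbis.Spec.get_bits.spec others frames Blk len))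
    (hst1 : Asan.SmallCheck Lay μ Vorbis.WayInv (Vorbis.CodeOK u₀) [.rax, .rdx] 1 Vorbis.L.__asan_store1_noabort.entry)
    {g : Ghost} {i : Nat} {A2 A3 Ai : Arena} {A : Arena × List Obj} {lengths E j : Nat} {v : State}
    (hat : InC4Mid u₀ g i A2 A3 Ai A lengths E j Vorbis.L.start_decoder.cut123 v) :
    ReachVia Lay μ WayInv v (fun w => InC4Mid u₀ g i A2 A3 Ai A lengths E j Vorbis.L.start_decoder.cut121 w ∨
        InC4Next u₀ g i A2 A3 Ai A lengths E j w) := by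
  have hfr := hat.frame
  have he := hfr.entry
  v_entry he
  simp only [depth] at he_room he_stack
  have w_rip := hfr.rip
  obtain ⟨hr1, hr2⟩ := hfr.r_eq
  simp only [steady] at hr1
  have hRA : g.RA = (g.e.reg .rsp).toNat := rfl
  have c_rsp : v.reg .rsp = g.e.reg .rsp - 1480 := by
    rw [hfr.rsp]
    refine (eq_addr _ _ ?_).symm
    unfold Ghost.R Ghost.RA steady
    u_omega
  have hE : (Codebook.entries v.mem (g.cb v.mem i)).toNat = E := hat.ent
  have hjE : j < (Codebook.entries v.mem (g.cb v.mem i)).toNat := by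
    rw [hE]
    exact hat.j_lt
  have hj31 : j < 2 ^ 31 := by
    have := hat.k1.ent_lt
    omega
  have c_r12 : v.reg .r12 = UInt64.ofNat j := hat.r12
  have c_rbx := hat.rbx
  have c_rbp := hat.rbp
  have sl_f : v.mem.readLE (g.e.reg .rsp - 1456) 8 = g.f := by
    have e : addr (g.R + 0x18) = g.e.reg .rsp - 1456 := by
      refine (eq_addr _ _ ?_).symm
      unfold Ghost.R Ghost.RA steady
      u_omega
    rw [← e]
    exact hat.cur.slot_f
  have hst := C4.obj_stack hfr hat.cur.hand
  obtain ⟨lw1, lw2, lw3, lw4⟩ := C4.lengths_where hat.cur.sd.arena (fun B hB => hB.1) hat.place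
  rw [hE] at lw2 lw3 lw4
  have htx := hat.cur.hand.arenaText
  simp only [Vorbis.L.textHi] at htx
  have hbw : UInt64.ofNat j + addr lengths = addr (lengths + j) := by
    rw [UInt64.add_comm]
    exact addr_add lengths j
  have hbn : (addr (lengths + j)).toNat = lengths + j := toNat_addr _ (by omega)
  have w_eq : Mem.EqOn Vorbis.L.textLo Vorbis.L.textHi u₀.mem v.mem := hfr.code
  have hdf : v.flags .df = false := (show abiInv _ from hfr.inv).1
  have hmx : v.mxcsr &&& 0x1F80 = 0x1F80 := (show abiInv _ from hfr.inv).2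
  have hsse := Vorbis.sseOK_of_abiInv hfr.inv
  have hgb' := hgb A.2 g.frames' (g.Blk A) g.len
  u_walk hcode [hμ.vendor, Vorbis.Spec.cnt32_sext j hj31, Vorbis.Spec.cnt32_succ j (by omega)] until [Vorbis.L.start_decoder.cut121, Vorbis.L.start_decoder.cut122] span [Vorbis.L.textLo, Vorbis.L.textHi] side (v_side)
  case call_inv => v_inv
  case pre_11479c =>
    have hun : ShadowUntouched v.mem s_11479c.mem := by v_untouched
    have t1 : (g.e.reg .rsp - 1488).toNat = (g.e.reg .rsp).toNat - 1488 := by u_omega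
    refine ⟨C4.reader_pre hfr hat.cur hun ?_ ?_ ?_, ?_⟩
    · rw [w_rsp, t1]
      omega
    · rw [w_rdi]
      rfl
    · rw [w_mem]
      exact Mem.eqOn_writeLE v.mem _ 8 _ g.f 1808 (by rw [t1]; omega) (by rw [t1]; omega)
    · rw [bitsArg_def, w_rsi]
      decide
  case check_114802 =>
    have hun : ShadowUntouched v.mem s_114802.mem := by v_untouched
    rw [hbw]
    exact C4.lengths_site hat.cur.sd.arena hfr.shadow hun (fun B hB => hB.1) hat.place hjE hbn
  · -- the return of `get_bits(f, 5)`: `InC4Mid` at `cut121`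
    v_after_call w_rsp_11479c w_mem_11479c
    have t1 : (g.e.reg .rsp - 1488).toNat = (g.e.reg .rsp).toNat - 1488 := by u_omega
    have hobr := hat.cur.sd.bits.OBR
    simp only [voff] at hobr
    have hf : (s_11479c.reg .rdi).toNat = g.f := by
      rw [w_rdi_11479c]
      exact toNat_addr g.f (by omega)
    simp only [hf, t1] at w_same
    have hpush : Mem.SameExcept [⟨g.R - 408, g.R⟩] v.mem (v.mem.writeLE (g.e.reg .rsp - 1488) 8 1132449) := by
      refine Mem.SameExcept.writeLE _ v.mem _ 8 _ ?_ ⟨⟨g.R - 408, g.R⟩, List.mem_cons_self, ?_, ?_⟩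
      · rw [t1]
        omega
      · rw [t1]
        show g.R - 408 ≤ _
        omega
      · rw [t1]
        show _ ≤ g.R
        omega
    have hag1 : C4.Agree g.R g.f A.1.B 0 v.mem (v.mem.writeLE (g.e.reg .rsp - 1488) 8 1132449) := by
      apply C4.Agree.of_sameExcept hpush
      intro w hw
      simp only [List.mem_cons, List.not_mem_nil, or_false] at hw
      rw [hw]
      left
      exact ⟨Nat.le_refl _, Nat.le_refl _⟩
    have hag2 : C4.Agree g.R g.f A.1.B 0 (v.mem.writeLE (g.e.reg .rsp - 1488) 8 1132449) s_11479cr.mem := by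
      apply C4.Agree.of_sameExcept w_same
      intro w hw
      simp only [List.mem_cons, List.not_mem_nil, or_false] at hw
      rcases hw with rfl | rfl | rfl | rfl | rfl | rfl
      · left
        dsimp only
        omega
      · right; left
        exact ⟨Nat.le_refl _, Nat.le_refl _⟩
      · right; right; left
        exact ⟨Nat.le_refl _, Nat.le_refl _⟩
      · right; right; right; left
        exact ⟨Nat.le_refl _, Nat.le_refl _⟩
      · right; right; right; right; left
        exact ⟨Nat.le_refl _, Nat.le_refl _⟩
      · right; right; right; right; right; left
        exact ⟨Nat.le_refl _, Nat.le_refl _⟩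
    have hag := hag1.trans hag2
    have hp : GetBitsSpecPost (g.Blk A) g.len (s_11479c.reg .rdi).toNat (bitsArg s_11479c) s_11479c s_11479cr := w_post
    have hbits := hp.bits.bits
    rw [hf] at hbits
    have harg : bitsArg s_11479c = 5 := by
      rw [bitsArg_def, w_rsi_11479c]
      decide
    have hres := hp.bits.result
    rw [harg] at hres
    have hrax : (s_11479cr.reg .rax).toNat < 32 := by
      unfold GetBitsResult at hres
      omega
    have habi : abiInv s_11479cr := Vorbis.abiInv_of w_df w_mx
    have hrsp : s_11479cr.reg .rsp = v.reg .rsp := by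
      rw [w_rsp, c_rsp]
    have hjv : j < C4.entriesOf g i v := by
      rw [hat.ent]
      exact hat.j_lt
    have hm := C4.mid_of_call (pc' := Vorbis.L.start_decoder.cut121) hfr hat.cur hat.k1 hat.lenL hat.place hat.fresh hjv hag hbits
      w_rip hrsp habi ((w_kept .r12 rfl).trans hat.r12) ((w_kept .rbp rfl).trans c_rbp) ((w_kept .rbx rfl).trans c_rbx)
      (w_kept .r14 rfl) (fun _ => hrax)
    rw [hat.ent] at hm
    exact ReachVia.done (Or.inl hm)
  · -- `lengths[j] = NO_CODE ; ++j`: back at the head, `InC4Next`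
    rw [hbw] at w_mem
    have t1 : (g.e.reg .rsp - 1488).toNat = (g.e.reg .rsp).toNat - 1488 := by u_omega
    have hout := hat.cur.hand.objOut
    simp only [voff] at hout
    have hsame : Mem.SameExcept [⟨g.R - 408, g.R⟩, ⟨lengths + j, lengths + j + 1⟩] v.mem s_1147bf.mem := by
      rw [w_mem]
      refine Mem.SameExcept.step_writeLE _ 1 255 (Mem.SameExcept.writeLE _ v.mem _ 8 _ ?_ ?_) ?_ ?_
      · rw [t1]
        omega
      · refine ⟨⟨g.R - 408, g.R⟩, List.mem_cons_self, ?_, ?_⟩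
        · rw [t1]
          show g.R - 408 ≤ _
          omega
        · rw [t1]
          show _ ≤ g.R
          omega
      · rw [hbn]
        omega
      · refine ⟨⟨lengths + j, lengths + j + 1⟩, List.mem_cons_of_mem _ List.mem_cons_self, ?_, ?_⟩
        · rw [hbn]
          exact Nat.le_refl _
        · rw [hbn]
          exact Nat.le_refl _
    have hag : C4.Agree g.R g.f (lengths + j) 1 v.mem s_1147bf.mem := by
      apply C4.Agree.of_sameExcept hsame
      intro w hw
      simp only [List.mem_cons, List.not_mem_nil, or_false] at hw
      rcases hw with rfl | rfl
      · left
        exact ⟨Nat.le_refl _, Nat.le_refl _⟩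
      · right; right; right; right; right; right
        exact ⟨Nat.le_refl _, Nat.le_refl _⟩
    have heq : Mem.EqOn g.f (g.f + 1808) v.mem s_1147bf.mem := by
      apply hsame.eqOn
      intro w hw
      simp only [List.mem_cons, List.not_mem_nil, or_false] at hw
      rcases hw with rfl | rfl
      · show g.f + 1808 ≤ g.R - 408 ∨ g.R ≤ g.f
        exact hst
      · show g.f + 1808 ≤ lengths + j ∨ lengths + j + 1 ≤ g.f
        omega
    have habi : abiInv s_1147bf := by
      refine Vorbis.abiInv_of ?_ ?_
      · rw [w_flags]
        simp only [X86.User.df_setStatus]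
        exact w_df_114802
      · rw [w_mxcsr]
        exact hmx
    have hbyte : s_1147bf.mem.u8 (lengths + j) = 255 := by
      unfold Mem.u8
      rw [w_mem, Mem.readLE_writeLE_same _ _ 1 255 (by decide)]
    have hrsp : s_1147bf.reg .rsp = v.reg .rsp := by
      rw [w_rsp, c_rsp]
    refine ReachVia.done (Or.inr ?_)
    exact C4.next_of_store hat hag (C4.bits_same hat.cur heq) w_rip hrsp habi w_r12 ((w_kept .rbx rfl).trans c_rbx)
      (w_kept .r14 rfl) (Or.inr hbyte) (Or.inl ⟨hbyte, w_kept .rbp rfl⟩)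

end Vorbis.Spec.start_decoder_C4b

/-- The unit `start_decoder.C4b`: `segC4b_walk` at every entry state. -/
theorem Vorbis.Spec.Worked.start_decoder_C4b_ok : Vorbis.Spec.start_decoder_C4b.Statement := by
  intro Lay hLay μ hμ u₀ hcode hgb hst1 g i A2 A3 Ai A lengths E j v hat
  exact Vorbis.Spec.start_decoder_C4b.segC4b_walk hLay hμ hcode hgb hst1 hat
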